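-- pv_equiv track=rewrite | github.com/rsprenkels/aoc | 2023/02/aoc_02.py | sol_part1
-- ===== SOURCE A (Python) =====
-- from typing import List
--
-- def sol_part1(lines: List[str], part = 1) -> int:
--
--     total_power = 0
--     total = 0
--     for line in lines:
--         max_per_color = {'red':0, 'green':0, 'blue':0}
--         game, reveals = line.split(': ')
--         game_id = int(game[5:])
--         for reveal in reveals.split('; '):
--             for ball in reveal.split(', '):
--                 number, color = list(ball.split(' '))
--                 max_per_color[color] = max(max_per_color[color], int(number))
--         if max_per_color['red'] > 12 or max_per_color['green'] > 13 or max_per_color['blue'] > 14: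
--             pass
--         else:
--             total += game_id
--         total_power += max_per_color['red'] * max_per_color['green'] * max_per_color['blue']
--     if part == 1:
--         return total
--     else:
--         return total_power
-- ===== SOURCE B (Python) =====
-- from typing import List
--
-- def sol_part1(lines: List[str], part = 1) -> int:
--     games = []
--     for line in lines:
--         game, reveals = line.split(': ')
--         pairs = [ball.split(' ') for reveal in reveals.split('; ') for ball in reveal.split(', ')]
--         maxima = tuple(max([0] + [int(n) for n, c in pairs if c == color])
--                        for color in ('red', 'green', 'blue'))
--         games.append((int(game[5:]), maxima))
--     if part == 1:
--         return sum(gid for gid, (r, g, b) in games if r <= 12 and g <= 13 and b <= 14)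
--     return sum(r * g * b for gid, (r, g, b) in games)
-- ===== Notes on version B (the rewrite author's own statement) =====
-- stated objective: alternative
-- what changed: Replaces the per-line mutable max-dict and running total accumulators with a parse-to-records pass: reveals are flattened into one token list, per-color maxima are taken with max() over a filtered comprehension (no dict), and the two answers are final sum() comprehensions over the record list.
import Mathlib
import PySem

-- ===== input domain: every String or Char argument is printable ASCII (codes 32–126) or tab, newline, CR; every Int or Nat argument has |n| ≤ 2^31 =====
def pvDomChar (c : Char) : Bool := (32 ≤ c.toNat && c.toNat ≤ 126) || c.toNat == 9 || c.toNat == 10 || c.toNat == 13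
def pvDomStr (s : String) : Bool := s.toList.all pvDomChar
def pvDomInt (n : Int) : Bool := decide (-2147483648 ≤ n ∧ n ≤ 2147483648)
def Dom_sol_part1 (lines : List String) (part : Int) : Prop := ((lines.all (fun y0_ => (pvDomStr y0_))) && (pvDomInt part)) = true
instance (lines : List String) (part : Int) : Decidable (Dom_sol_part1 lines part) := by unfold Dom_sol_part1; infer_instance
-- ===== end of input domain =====

-- B replaces A's per-line mutable max-dict and running totals with a parse-to-records pass
-- (flattened token list, per-color maxima over filtered lists, final sums): alternative decomposition, not faster.

-- ===== PORT A =====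
-- shared primitive: Python's s.split(sep) for a nonempty literal sep
def pySplit (s sep : String) : List String := (PySem.Str.split? s sep).getD []

-- inner body of A's two nested reveal/ball loops: one ball string updates the dict
def solA_ballStep (d : PySem.Dict String Int) (ball : String) : PySem.Dict String Int :=
  match pySplit ball " " with
  | [number, color] =>
    match d.get? color, PySem.Int.ofStr? number with
    | some cur, some n => d.insert color (max cur n)
    | _, _ => d                  -- Python raises (KeyError/ValueError) here; outside Pre_
  | _ => d                       -- Python raises (unpack ValueError) here; outside Pre_

-- A's loop body for one line, acc = (total, total_power)
def solA_line (acc : Int × Int) (line : String) : Int × Int :=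
  match pySplit line ": " with
  | [game, reveals] =>
    match PySem.Int.ofStr? (PySem.Str.slice game (some 5) none) with
    | some game_id =>
      let d0 : PySem.Dict String Int := PySem.Dict.ofList [("red", 0), ("green", 0), ("blue", 0)]
      let d := (pySplit reveals "; ").foldl
        (fun d reveal => (pySplit reveal ", ").foldl solA_ballStep d) d0
      let r := (d.get? "red").getD 0
      let g := (d.get? "green").getD 0
      let b := (d.get? "blue").getD 0
      ((if r > 12 ∨ g > 13 ∨ b > 14 then acc.1 else acc.1 + game_id), acc.2 + r * g * b)
    | none => acc                -- Python raises ValueError here; outside Pre_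
  | _ => acc                     -- Python raises (unpack ValueError) here; outside Pre_

def sol_part1 (lines : List String) (part : Int) : Int :=
  let st := lines.foldl solA_line (0, 0)
  if part = 1 then st.1 else st.2

-- ===== PORT B =====
-- [int(n) for n, c in pairs if c == color]
def solB_vals (pairs : List (List String)) (color : String) : List Int :=
  pairs.filterMap (fun p =>
    match p with
    | [n, c] => if c = color then PySem.Int.ofStr? n else none
    | _ => none)

-- max([0] + [...])
def solB_maxColor (pairs : List (List String)) (color : String) : Int :=
  (PySem.List.max? ((0 : Int) :: solB_vals pairs color) (fun x => x)).getD 0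

-- one record (game_id, (r, g, b)); none where the Python raises (outside Pre_)
def solB_record (line : String) : Option (Int × (Int × Int × Int)) :=
  match pySplit line ": " with
  | [game, reveals] =>
    match PySem.Int.ofStr? (PySem.Str.slice game (some 5) none) with
    | some gid =>
      let pairs := ((pySplit reveals "; ").flatMap
          (fun reveal => pySplit reveal ", ")).map (fun ball => pySplit ball " ")
      some (gid, (solB_maxColor pairs "red", solB_maxColor pairs "green", solB_maxColor pairs "blue"))
    | none => none
  | _ => none

def sol_part1_alt (lines : List String) (part : Int) : Int :=
  let games := lines.filterMap solB_record
  if part = 1 then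
    ((games.filter (fun gm => gm.2.1 ≤ 12 && gm.2.2.1 ≤ 13 && gm.2.2.2 ≤ 14)).map (·.1)).sum
  else
    (games.map (fun gm => gm.2.1 * gm.2.2.1 * gm.2.2.2)).sum

-- ===== PRECONDITION & SPEC =====
-- shape of one "<n> <color>" token: exactly two space-separated pieces, an int and a known color
def pvValidBall (ball : String) : Bool :=
  match pySplit ball " " with
  | [n, c] => (PySem.Int.ofStr? n).isSome && (c == "red" || c == "green" || c == "blue")
  | _ => false

def pvValidLine (line : String) : Bool :=
  match pySplit line ": " with
  | [game, reveals] =>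
    (PySem.Int.ofStr? (PySem.Str.slice game (some 5) none)).isSome &&
    (pySplit reveals "; ").all (fun reveal => (pySplit reveal ", ").all pvValidBall)
  | _ => false

-- Pre_ excludes exactly the malformed lines on which A raises (ValueError on the unpacks /
-- int(), KeyError on an unknown color): each line must split on ': ' into exactly two pieces,
-- the game id must parse as an int, and every ball token must be '<int> <red|green|blue>'.
def Pre_sol_part1 (lines : List String) (part : Int) : Prop :=
  lines.all pvValidLine = true

instance (lines : List String) (part : Int) : Decidable (Pre_sol_part1 lines part) := by
  unfold Pre_sol_part1; infer_instance

def pvWitness_sol_part1 : List String × Int :=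
  (["Game 1: 3 blue, 4 red; 1 red, 2 green", "Game 2: 20 red, 1 blue"], 1)

def Spec_sol_part1 (lines : List String) (part : Int) (out : Int) : Prop := out = sol_part1_alt lines part
instance (lines : List String) (part : Int) (out : Int) : Decidable (Spec_sol_part1 lines part out) := by unfold Spec_sol_part1; infer_instance

-- ===== CLAIM (what is proved, stated in full; the proofs are below) =====
def Claim_equal_sol_part1 : Prop := ∀ (lines : List String) (part : Int), Dom_sol_part1 lines part → Pre_sol_part1 lines part → Spec_sol_part1 lines part (sol_part1 lines part)

-- ===== LEMMAS AND PROOFS =====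

-- A's nested foldl over reveal/ball strings is a flat foldl over the flattened token list
theorem solA_nested_foldl (reveals : List String) (d : PySem.Dict String Int) :
    reveals.foldl (fun d reveal => (pySplit reveal ", ").foldl solA_ballStep d) d
      = (reveals.flatMap (fun reveal => pySplit reveal ", ")).foldl solA_ballStep d := by
  induction reveals generalizing d with
  | nil => rfl
  | cons x xs ih => simp [List.flatMap_cons, List.foldl_append, ih]

-- unfolding one well-shaped pair through B's filtered-values list
theorem solB_vals_cons_pair (n c : String) (rest : List (List String)) (color : String) :
    solB_vals ([n, c] :: rest) color
      = match (if c = color then PySem.Int.ofStr? n else none) with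
        | some v => v :: solB_vals rest color
        | none => solB_vals rest color := by
  cases h : (if c = color then PySem.Int.ofStr? n else none) <;>
    simp [solB_vals, h]

-- core invariant: folding valid ball tokens through A's dict updates tracks the per-color running maxima
theorem solA_dict_max (toks : List String) (d : PySem.Dict String Int)
    (h : toks.all pvValidBall = true)
    (vr vg vb : Int)
    (hr : d.get? "red" = some vr) (hg : d.get? "green" = some vg) (hb : d.get? "blue" = some vb) :
    (toks.foldl solA_ballStep d).get? "red"
        = some ((solB_vals (toks.map (fun b => pySplit b " ")) "red").foldl max vr) ∧
    (toks.foldl solA_ballStep d).get? "green"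
        = some ((solB_vals (toks.map (fun b => pySplit b " ")) "green").foldl max vg) ∧
    (toks.foldl solA_ballStep d).get? "blue"
        = some ((solB_vals (toks.map (fun b => pySplit b " ")) "blue").foldl max vb) := by
  induction toks generalizing d vr vg vb with
  | nil => simp [solB_vals, hr, hg, hb]
  | cons ball rest ih =>
    simp only [List.all_cons, Bool.and_eq_true] at h
    obtain ⟨hball, hrest⟩ := h
    unfold pvValidBall at hball
    match hsp : pySplit ball " " with
    | [] => rw [hsp] at hball; exact absurd hball (by simp)
    | [x] => rw [hsp] at hball; exact absurd hball (by simp)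
    | x :: y :: z :: w => rw [hsp] at hball; exact absurd hball (by simp)
    | [n, c] =>
      rw [hsp] at hball
      simp only [Bool.and_eq_true, Bool.or_eq_true, beq_iff_eq] at hball
      obtain ⟨hn, hc⟩ := hball
      obtain ⟨v, hv⟩ := Option.isSome_iff_exists.mp hn
      have hstep : ∀ cur, d.get? c = some cur →
          solA_ballStep d ball = d.insert c (max cur v) := by
        intro cur hcur
        unfold solA_ballStep
        rw [hsp]
        simp only [hcur, hv]
      simp only [List.foldl_cons, List.map_cons, hsp, solB_vals_cons_pair]
      rcases hc with (hc | hc) | hc <;> subst hc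
      · rw [hstep vr hr]
        simpa [hv] using ih (d.insert "red" (max vr v)) hrest (max vr v) vg vb
          (PySem.Dict.get?_insert_self _ _ _)
          (by rw [PySem.Dict.get?_insert_of_ne _ _ (by decide)]; exact hg)
          (by rw [PySem.Dict.get?_insert_of_ne _ _ (by decide)]; exact hb)
      · rw [hstep vg hg]
        simpa [hv] using ih (d.insert "green" (max vg v)) hrest vr (max vg v) vb
          (by rw [PySem.Dict.get?_insert_of_ne _ _ (by decide)]; exact hr)
          (PySem.Dict.get?_insert_self _ _ _)
          (by rw [PySem.Dict.get?_insert_of_ne _ _ (by decide)]; exact hb)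
      · rw [hstep vb hb]
        simpa [hv] using ih (d.insert "blue" (max vb v)) hrest vr vg (max vb v)
          (by rw [PySem.Dict.get?_insert_of_ne _ _ (by decide)]; exact hr)
          (by rw [PySem.Dict.get?_insert_of_ne _ _ (by decide)]; exact hg)
          (PySem.Dict.get?_insert_self _ _ _)

-- per-line agreement: on a valid line A's step adds exactly B's record contribution
theorem solA_line_eq (line : String) (h : pvValidLine line = true) (t p : Int) :
    ∃ gid r g b, solB_record line = some (gid, (r, g, b)) ∧
      solA_line (t, p) line
        = ((if r > 12 ∨ g > 13 ∨ b > 14 then t else t + gid), p + r * g * b) := by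
  unfold pvValidLine at h
  match hsp : pySplit line ": " with
  | [] => rw [hsp] at h; exact absurd h (by simp)
  | [x] => rw [hsp] at h; exact absurd h (by simp)
  | x :: y :: z :: w => rw [hsp] at h; exact absurd h (by simp)
  | [game, reveals] =>
    rw [hsp] at h
    simp only [Bool.and_eq_true] at h
    obtain ⟨hid, hrev⟩ := h
    obtain ⟨gid, hgid⟩ := Option.isSome_iff_exists.mp hid
    have htoks : ((pySplit reveals "; ").flatMap
        (fun reveal => pySplit reveal ", ")).all pvValidBall = true := by
      rw [List.all_eq_true] at hrev ⊢
      intro ball hball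
      obtain ⟨reveal, hrv, hball⟩ := List.mem_flatMap.mp hball
      have := hrev reveal hrv
      rw [List.all_eq_true] at this
      exact this ball hball
    have d0spec : (PySem.Dict.ofList [("red", (0:Int)), ("green", 0), ("blue", 0)]).get? "red" = some 0 ∧
        (PySem.Dict.ofList [("red", (0:Int)), ("green", 0), ("blue", 0)]).get? "green" = some 0 ∧
        (PySem.Dict.ofList [("red", (0:Int)), ("green", 0), ("blue", 0)]).get? "blue" = some 0 := by
      decide
    obtain ⟨hdr, hdg, hdb⟩ := solA_dict_max _ _ htoks 0 0 0 d0spec.1 d0spec.2.1 d0spec.2.2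
    refine ⟨gid,
      solB_maxColor (((pySplit reveals "; ").flatMap
        (fun reveal => pySplit reveal ", ")).map (fun ball => pySplit ball " ")) "red",
      solB_maxColor (((pySplit reveals "; ").flatMap
        (fun reveal => pySplit reveal ", ")).map (fun ball => pySplit ball " ")) "green",
      solB_maxColor (((pySplit reveals "; ").flatMap
        (fun reveal => pySplit reveal ", ")).map (fun ball => pySplit ball " ")) "blue",
      ?_, ?_⟩
    · unfold solB_record
      rw [hsp]
      simp only [hgid]
    · unfold solA_line
      rw [hsp]
      simp only [hgid, solA_nested_foldl]
      rw [hdr, hdg, hdb]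
      unfold solB_maxColor
      rw [PySem.List.max?_id_cons, PySem.List.max?_id_cons, PySem.List.max?_id_cons]

theorem solA_fold_eq (lines : List String) (h : lines.all pvValidLine = true) (t p : Int) :
    lines.foldl solA_line (t, p)
      = (t + (((lines.filterMap solB_record).filter
                (fun gm => gm.2.1 ≤ 12 && gm.2.2.1 ≤ 13 && gm.2.2.2 ≤ 14)).map (·.1)).sum,
         p + ((lines.filterMap solB_record).map (fun gm => gm.2.1 * gm.2.2.1 * gm.2.2.2)).sum) := by
  induction lines generalizing t p with
  | nil => simp
  | cons line rest ih =>
    simp only [List.all_cons, Bool.and_eq_true] at h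
    obtain ⟨hline, hrest⟩ := h
    obtain ⟨gid, r, g, b, hrec, hstep⟩ := solA_line_eq line hline t p
    rw [List.foldl_cons, hstep, ih hrest, List.filterMap_cons, hrec]
    by_cases hc : r > 12 ∨ g > 13 ∨ b > 14
    · have hfc : ((fun gm : Int × (Int × Int × Int) =>
          gm.2.1 ≤ 12 && gm.2.2.1 ≤ 13 && gm.2.2.2 ≤ 14) (gid, (r, g, b))) = false := by
        simp only [Bool.and_eq_false_iff, decide_eq_false_iff_not, not_le]
        omega
      simp [hc, hfc]
      omega
    · have hfc : ((fun gm : Int × (Int × Int × Int) =>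
          gm.2.1 ≤ 12 && gm.2.2.1 ≤ 13 && gm.2.2.2 ≤ 14) (gid, (r, g, b))) = true := by
        simp only [Bool.and_eq_true, decide_eq_true_eq]
        omega
      simp [hc, hfc]
      omega

-- ===== VERDICT (by name: the statement is the Claim_ definition above) =====
theorem sol_part1_spec : Claim_equal_sol_part1 := by
  intro lines part _ hpre
  unfold Spec_sol_part1 sol_part1 sol_part1_alt
  rw [solA_fold_eq lines hpre 0 0]
  split <;> simp
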